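-- pv_equiv track=rewrite | github.com/wrangleworks/WranglesPY | wrangles/compare.py | mask_original_term
-- ===== SOURCE A (Python) =====
-- def mask_original_term(orig_t: str, missing_start: int, missing_end: int) -> str:
--     """
--     Replaces unmatched characters at the start and end of the original string with asterisks
--     based on the missing counts calculated from the normalized matching blocks.
--     """
--     if missing_start == 0 and missing_end == 0:
--         return orig_t
--
--     chars = list(orig_t)
--
--     start_idx = 0
--     if missing_start > 0:
--         alphanum_count = 0
--         for i, c in enumerate(chars):
--             if c.isalnum():
--                 alphanum_count += 1
--             if alphanum_count == missing_start:
--                 start_idx = i + 1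
--                 break
--
--     end_idx = len(chars)
--     if missing_end > 0:
--         alphanum_count = 0
--         for i in range(len(chars)-1, -1, -1):
--             if chars[i].isalnum():
--                 alphanum_count += 1
--             if alphanum_count == missing_end:
--                 end_idx = i
--                 break
--
--     res = ""
--     if missing_start > 0:
--         res += "*" * missing_start
--
--     if start_idx >= end_idx:
--         return "*" * (missing_start + missing_end)
--
--     res += "".join(chars[start_idx:end_idx])
--
--     if missing_end > 0:
--         res += "*" * missing_end
--
--     return res
-- ===== SOURCE B (Python) =====
-- def mask_original_term(orig_t: str, missing_start: int, missing_end: int) -> str: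
--     if missing_start == 0 and missing_end == 0:
--         return orig_t
--     alnum = [i for i, c in enumerate(orig_t) if c.isalnum()]
--     n = len(alnum)
--     start_idx = alnum[missing_start - 1] + 1 if 0 < missing_start <= n else 0
--     end_idx = alnum[n - missing_end] if 0 < missing_end <= n else len(orig_t)
--     if start_idx >= end_idx:
--         return "*" * (missing_start + missing_end)
--     return "*" * max(missing_start, 0) + orig_t[start_idx:end_idx] + "*" * max(missing_end, 0)
-- ===== Notes on version B (the rewrite author's own statement) =====
-- stated objective: simpler
-- what changed: Replaces A's two counter-and-break scans (forward and backward) with a single forward pass building the list of alphanumeric indices, from which start and end cut points are read off by direct indexing.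
import Mathlib
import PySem

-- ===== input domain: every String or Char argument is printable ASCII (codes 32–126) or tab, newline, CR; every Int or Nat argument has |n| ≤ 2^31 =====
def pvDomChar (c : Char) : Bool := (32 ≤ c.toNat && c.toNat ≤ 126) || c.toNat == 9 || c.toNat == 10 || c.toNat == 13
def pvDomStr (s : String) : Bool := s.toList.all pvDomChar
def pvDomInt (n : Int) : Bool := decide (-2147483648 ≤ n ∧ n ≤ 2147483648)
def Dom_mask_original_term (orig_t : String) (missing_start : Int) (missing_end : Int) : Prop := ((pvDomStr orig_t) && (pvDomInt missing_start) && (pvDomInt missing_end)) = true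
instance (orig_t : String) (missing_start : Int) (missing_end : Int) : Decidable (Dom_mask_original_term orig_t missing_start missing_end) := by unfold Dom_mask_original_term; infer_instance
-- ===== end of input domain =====

-- B replaces A's two counter-and-break scans by one alphanumeric index table with direct
-- lookups (objective: simpler); return values agree everywhere.

-- str.isalnum() for a single character; exact on the ASCII domain (Dom) these claims cover
def pvIsAlnum (c : Char) : Bool :=
  ('0' ≤ c && c ≤ '9') || ('A' ≤ c && c ≤ 'Z') || ('a' ≤ c && c ≤ 'z')

-- ===== PORT A =====
-- 'for i, c in enumerate(chars): …' with break; returns start_idx (0 if the loop finishes)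
def pvAStartLoop (items : List (Int × Char)) (ms : Int) (count : Int) : Int :=
  match items with
  | [] => 0
  | (i, c) :: rest =>
    let count := if pvIsAlnum c then count + 1 else count
    if count == ms then i + 1 else pvAStartLoop rest ms count

-- 'for i in range(len(chars)-1,-1,-1): …' with break; iterates the enumerated pairs in
-- reverse, which visits the same (i, chars[i]) values; returns end_idx (dflt if no break)
def pvAEndLoop (items : List (Int × Char)) (me : Int) (count : Int) (dflt : Int) : Int :=
  match items with
  | [] => dflt
  | (i, c) :: rest =>
    let count := if pvIsAlnum c then count + 1 else count
    if count == me then i else pvAEndLoop rest me count dflt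

-- 'start_idx = 0; if missing_start > 0: <loop>'
def pvAStart (cs : List Char) (ms : Int) : Int :=
  if ms > 0 then pvAStartLoop (PySem.List.enumerate cs 0) ms 0 else 0

-- 'end_idx = len(chars); if missing_end > 0: <loop>'
def pvAEnd (cs : List Char) (me : Int) : Int :=
  if me > 0 then pvAEndLoop ((PySem.List.enumerate cs 0).reverse) me 0 (cs.length : Int)
  else (cs.length : Int)

def mask_original_term (orig_t : String) (missing_start : Int) (missing_end : Int) : String :=
  if missing_start == 0 && missing_end == 0 then orig_t
  else
    let chars := orig_t.toList
    let start_idx := pvAStart chars missing_start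
    let end_idx := pvAEnd chars missing_end
    let res := if missing_start > 0 then String.ofList (List.replicate missing_start.toNat '*') else ""
    if start_idx ≥ end_idx then String.ofList (List.replicate (missing_start + missing_end).toNat '*')
    else
      let res := res ++ String.ofList (PySem.List.slice chars (some start_idx) (some end_idx))
      if missing_end > 0 then res ++ String.ofList (List.replicate missing_end.toNat '*') else res

-- ===== PORT B =====
-- 'alnum = [i for i, c in enumerate(orig_t) if c.isalnum()]'
def pvBAlnum (cs : List Char) : List Int :=
  (PySem.List.enumerate cs 0).filterMap (fun p => if pvIsAlnum p.2 then some p.1 else none)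

-- 'start_idx = alnum[missing_start - 1] + 1 if 0 < missing_start <= n else 0'
def pvBStart (alnum : List Int) (ms : Int) : Int :=
  if 0 < ms ∧ ms ≤ (alnum.length : Int) then (PySem.List.pyGet? alnum (ms - 1)).getD 0 + 1 else 0

-- 'end_idx = alnum[n - missing_end] if 0 < missing_end <= n else len(orig_t)'
def pvBEnd (alnum : List Int) (me : Int) (len : Int) : Int :=
  if 0 < me ∧ me ≤ (alnum.length : Int) then
    (PySem.List.pyGet? alnum ((alnum.length : Int) - me)).getD 0
  else len

def mask_original_term_alt (orig_t : String) (missing_start : Int) (missing_end : Int) : String :=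
  if missing_start == 0 && missing_end == 0 then orig_t
  else
    let cs := orig_t.toList
    let alnum := pvBAlnum cs
    let start_idx := pvBStart alnum missing_start
    let end_idx := pvBEnd alnum missing_end (cs.length : Int)
    if start_idx ≥ end_idx then String.ofList (List.replicate (missing_start + missing_end).toNat '*')
    else
      String.ofList (List.replicate (max missing_start 0).toNat '*')
        ++ String.ofList (PySem.List.slice cs (some start_idx) (some end_idx))
        ++ String.ofList (List.replicate (max missing_end 0).toNat '*')

-- ===== PRECONDITION & SPEC =====
def Spec_mask_original_term (orig_t : String) (missing_start : Int) (missing_end : Int) (out : String) : Prop := out = mask_original_term_alt orig_t missing_start missing_end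
instance (orig_t : String) (missing_start : Int) (missing_end : Int) (out : String) : Decidable (Spec_mask_original_term orig_t missing_start missing_end out) := by unfold Spec_mask_original_term; infer_instance

-- ===== CLAIM (what is proved, stated in full; the proofs are below) =====
def Claim_equal_mask_original_term : Prop := ∀ (orig_t : String) (missing_start : Int) (missing_end : Int), Dom_mask_original_term orig_t missing_start missing_end → Spec_mask_original_term orig_t missing_start missing_end (mask_original_term orig_t missing_start missing_end)

-- ===== LEMMAS AND PROOFS =====

lemma startLoop_spec (items : List (Int × Char)) (ms : Int) :
    ∀ count : Int, count < ms →
    pvAStartLoop items ms count =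
      match (items.filterMap (fun p => if pvIsAlnum p.2 then some p.1 else none))[(ms - count - 1).toNat]? with
      | some j => j + 1
      | none => 0 := by
  induction items with
  | nil => intro count h; simp [pvAStartLoop]
  | cons p rest ih =>
    intro count h
    obtain ⟨i, c⟩ := p
    by_cases ha : pvIsAlnum c
    · simp only [pvAStartLoop, List.filterMap_cons, ha, if_pos]
      by_cases he : count + 1 = ms
      · have h0 : (ms - count - 1).toNat = 0 := by omega
        simp [he, h0]
      · have hne : (count + 1 == ms) = false := by simp [he]
        have hlt : count + 1 < ms := by omega
        rw [hne]
        simp only [Bool.false_eq_true, if_false]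
        rw [ih (count + 1) hlt]
        have hidx : (ms - count - 1).toNat = (ms - (count + 1) - 1).toNat + 1 := by omega
        simp [hidx]
    · have hne : (count == ms) = false := by simp; omega
      simp only [pvAStartLoop, List.filterMap_cons, ha, Bool.false_eq_true, if_false]
      rw [hne]
      simp only [Bool.false_eq_true, if_false]
      exact ih count h
lemma endLoop_spec (items : List (Int × Char)) (me dflt : Int) :
    ∀ count : Int, count < me →
    pvAEndLoop items me count dflt =
      match (items.filterMap (fun p => if pvIsAlnum p.2 then some p.1 else none))[(me - count - 1).toNat]? with
      | some j => j
      | none => dflt := by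
  induction items with
  | nil => intro count h; simp [pvAEndLoop]
  | cons p rest ih =>
    intro count h
    obtain ⟨i, c⟩ := p
    by_cases ha : pvIsAlnum c
    · simp only [pvAEndLoop, List.filterMap_cons, ha, if_pos]
      by_cases he : count + 1 = me
      · have h0 : (me - count - 1).toNat = 0 := by omega
        simp [he, h0]
      · have hne : (count + 1 == me) = false := by simp [he]
        have hlt : count + 1 < me := by omega
        rw [hne]
        simp only [Bool.false_eq_true, if_false]
        rw [ih (count + 1) hlt]
        have hidx : (me - count - 1).toNat = (me - (count + 1) - 1).toNat + 1 := by omega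
        simp [hidx]
    · have hne : (count == me) = false := by simp; omega
      simp only [pvAEndLoop, List.filterMap_cons, ha, Bool.false_eq_true, if_false]
      rw [hne]
      simp only [Bool.false_eq_true, if_false]
      exact ih count h

lemma start_eq (cs : List Char) (ms : Int) : pvAStart cs ms = pvBStart (pvBAlnum cs) ms := by
  unfold pvAStart pvBStart
  set al := pvBAlnum cs with hal
  by_cases hms : ms > 0
  · rw [if_pos hms]
    rw [startLoop_spec _ ms 0 hms]
    have h2 : ms - 0 - 1 = ms - 1 := by ring
    rw [h2]
    have hfm : (PySem.List.enumerate cs 0).filterMap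
        (fun p => if pvIsAlnum p.2 then some p.1 else none) = al := by rw [hal]; rfl
    rw [hfm]
    by_cases hle : ms ≤ (al.length : Int)
    · rw [if_pos ⟨hms, hle⟩]
      rw [PySem.List.pyGet?_of_nonneg _ (by omega : (0:Int) ≤ ms - 1)]
      cases hq : al[(ms - 1).toNat]? with
      | none => rw [List.getElem?_eq_none_iff] at hq; omega
      | some j => rfl
    · rw [if_neg (by tauto)]
      have h4 : al[(ms - 1).toNat]? = none := by
        rw [List.getElem?_eq_none_iff]; omega
      rw [h4]
  · rw [if_neg hms, if_neg (by tauto)]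

lemma end_eq (cs : List Char) (me : Int) :
    pvAEnd cs me = pvBEnd (pvBAlnum cs) me (cs.length : Int) := by
  unfold pvAEnd pvBEnd
  set al := pvBAlnum cs with hal
  have hrev : (PySem.List.enumerate cs 0).reverse.filterMap
      (fun p => if pvIsAlnum p.2 then some p.1 else none) = al.reverse := by
    rw [hal]; simp [pvBAlnum, List.filterMap_reverse]
  by_cases hme : me > 0
  · rw [if_pos hme]
    rw [endLoop_spec _ me _ 0 hme, hrev]
    have h2 : me - 0 - 1 = me - 1 := by ring
    rw [h2]
    by_cases hle : me ≤ (al.length : Int)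
    · rw [if_pos ⟨hme, hle⟩]
      have hk : (me - 1).toNat < al.length := by omega
      rw [List.getElem?_reverse (by simpa using hk)]
      rw [PySem.List.pyGet?_of_nonneg _ (by omega : (0:Int) ≤ (al.length : Int) - me)]
      have h3 : al.length - 1 - (me - 1).toNat = ((al.length : Int) - me).toNat := by omega
      rw [h3]
      cases hq : al[((al.length : Int) - me).toNat]? with
      | none => rw [List.getElem?_eq_none_iff] at hq; omega
      | some j => rfl
    · rw [if_neg (by tauto)]
      have h4 : al.reverse[(me - 1).toNat]? = none := by
        rw [List.getElem?_eq_none_iff]; simp; omega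
      rw [h4]
  · rw [if_neg hme, if_neg (by tauto)]

-- ===== VERDICT (by name: the statement is the Claim_ definition above) =====
theorem mask_original_term_spec : Claim_equal_mask_original_term := by
  intro orig_t ms me _
  unfold Spec_mask_original_term mask_original_term mask_original_term_alt
  by_cases h0 : (ms == 0 && me == 0) = true
  · rw [if_pos h0, if_pos h0]
  · rw [if_neg h0, if_neg h0]
    simp only
    rw [start_eq orig_t.toList ms, end_eq orig_t.toList me]
    set s := pvBStart (pvBAlnum orig_t.toList) ms with hs
    set e := pvBEnd (pvBAlnum orig_t.toList) me (orig_t.toList.length : Int) with he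
    by_cases hse : s ≥ e
    · rw [if_pos hse, if_pos hse]
    · rw [if_neg hse, if_neg hse]
      rw [show (max ms 0).toNat = ms.toNat by omega, show (max me 0).toNat = me.toNat by omega]
      by_cases hmsp : ms > 0 <;> by_cases hmep : me > 0
      · rw [if_pos hmsp, if_pos hmep]
      · rw [if_pos hmsp, if_neg hmep]
        rw [show me.toNat = 0 by omega]
        simp
      · rw [if_neg hmsp, if_pos hmep]
        rw [show ms.toNat = 0 by omega]
        simp
      · rw [if_neg hmsp, if_neg hmep]
        rw [show ms.toNat = 0 by omega, show me.toNat = 0 by omega]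
        simp
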